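-- pv_equiv track=rewrite | github.com/wzygxr/shuati | class062_GCDCalculationAndLCM/AdditionalGcdLcmProblems.py | enlarge_gcd
-- ===== SOURCE A (Python) =====
-- import math
-- from typing import List, Optional
--
-- def enlarge_gcd(nums: List[int]) -> int:
--     """
--     Codeforces 1034A. Enlarge GCD
--     题目来源：https://codeforces.com/problemset/problem/1034/A
--     问题描述：给定n个正整数，通过删除最少的数来增大这些数的最大公约数。
--               返回需要删除的最少数字个数，如果无法增大GCD则返回-1。
--     解题思路：首先计算所有数的GCD，然后将所有数除以这个GCD，问题转化为找到一个大于1的因子，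
--               使得尽可能多的数是这个因子的倍数。枚举所有质数，统计是其倍数的数的个数，
--               答案就是n减去最大个数。
--     时间复杂度：O(n*log(max_value) + max_value*log(log(max_value)))
--     空间复杂度：O(max_value)
--     是否最优解：是，这是解决该问题的最优方法。
--     """
--     n = len(nums)
--
--     # 计算所有数的GCD
--     current_gcd = nums[0]
--     for i in range(1, n):
--         current_gcd = math.gcd(current_gcd, nums[i])
--
--     # 将所有数除以GCD
--     normalized = [num // current_gcd for num in nums]
--     max_value = max(normalized)
--
--     # 线性筛法预处理质数
--     is_prime = [True] * (max_value + 1)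
--     is_prime[0] = is_prime[1] = False
--
--     i = 2
--     while i * i <= max_value:
--         if is_prime[i]:
--             j = i * i
--             while j <= max_value:
--                 is_prime[j] = False
--                 j += i
--         i += 1
--
--     # 统计每个数出现的次数
--     count = [0] * (max_value + 1)
--     for num in normalized:
--         count[num] += 1
--
--     # 枚举质数，统计是其倍数的数的个数
--     max_count = 0
--     for i in range(2, max_value + 1):
--         if is_prime[i]:
--             prime_count = 0
--             j = i
--             while j <= max_value:
--                 prime_count += count[j]
--                 j += i
--             max_count = max(max_count, prime_count)
--
--     # 如果所有数都相同，则无法增大GCD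
--     if max_count == n:
--         return -1
--
--     return n - max_count
-- ===== SOURCE B (Python) =====
-- import math
-- from typing import List
--
--
-- def enlarge_gcd(nums: List[int]) -> int:
--     # Try every candidate divisor d >= 2 of the normalized values: the best
--     # candidate count equals the best prime's count, so no sieve is needed.
--     n = len(nums)
--     g = 0
--     for x in nums:
--         g = math.gcd(g, x)
--     normalized = [x // g for x in nums]
--     m = max(normalized)
--     freq = {}
--     for x in normalized:
--         freq[x] = freq.get(x, 0) + 1
--     best = 0
--     for d in range(2, m + 1):
--         c = 0
--         for j in range(d, m + 1, d):
--             c += freq.get(j, 0)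
--         if c > best:
--             best = c
--     return -1 if best == n else n - best
-- ===== Notes on version B (the rewrite author's own statement) =====
-- stated objective: simpler
-- what changed: Drops the prime sieve entirely: B tallies the normalized values in a frequency dict and maximises the multiple-count over EVERY candidate divisor d >= 2 (the max over all candidates equals the max over primes, since multiples of d are multiples of d's smallest prime factor), keeping A's final 'best == n -> -1' rule.
-- outside the precondition, e.g. on enlarge_gcd([-2, 0, 1, 3, 4]): A returns 3, B returns 4; on enlarge_gcd([-2, 4]): A returns -1, B returns 1
import Mathlib
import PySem

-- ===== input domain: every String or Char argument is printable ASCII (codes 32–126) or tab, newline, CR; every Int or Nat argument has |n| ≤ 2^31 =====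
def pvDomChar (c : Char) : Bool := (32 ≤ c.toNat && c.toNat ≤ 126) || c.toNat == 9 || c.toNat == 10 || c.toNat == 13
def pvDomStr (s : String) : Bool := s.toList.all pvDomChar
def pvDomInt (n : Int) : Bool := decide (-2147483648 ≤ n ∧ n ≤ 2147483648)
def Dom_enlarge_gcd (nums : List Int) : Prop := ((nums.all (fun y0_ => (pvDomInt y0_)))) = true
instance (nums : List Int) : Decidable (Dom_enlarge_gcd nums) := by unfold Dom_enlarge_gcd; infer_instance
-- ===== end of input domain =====

-- B drops A's prime sieve: it tallies the normalized values in a frequency dict and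
-- maximises the multiple-count over EVERY candidate divisor d ≥ 2 (the max over all
-- candidates equals the max over primes), keeping A's final return rule.


-- ===== PORT A =====
-- while j <= maxV: is_prime[j] = False; j += i      (the '0 < i' test only makes the
-- recursion well-founded; the Python loop is reached only with i ≥ 2)
def egSieveInner (maxV i j : Int) (arr : List Bool) : List Bool :=
  if _h : 0 < i ∧ j ≤ maxV then
    egSieveInner maxV i (j + i) (arr.set j.toNat false)
  else arr
termination_by (maxV + 1 - j).toNat
decreasing_by omega

-- while i * i <= maxV: if is_prime[i]: <inner loop from i*i>; i += 1   ('0 < i' as above)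
def egSieveOuter (maxV i : Int) (arr : List Bool) : List Bool :=
  if _h : 0 < i ∧ i * i ≤ maxV then
    egSieveOuter maxV (i + 1)
      (if arr.getD i.toNat false then egSieveInner maxV i (i * i) arr else arr)
  else arr
termination_by (maxV + 1 - i).toNat
decreasing_by
  obtain ⟨h1, h2⟩ := _h
  have : i ≤ i * i := le_mul_of_one_le_left (by omega) (by omega)
  omega

-- while j <= maxV: prime_count += count[j]; j += i   ('0 < i' as above)
def egPrimeCount (maxV i j : Int) (cnt : List Int) (acc : Int) : Int :=
  if _h : 0 < i ∧ j ≤ maxV then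
    egPrimeCount maxV i (j + i) cnt (acc + cnt.getD j.toNat 0)
  else acc
termination_by (maxV + 1 - j).toNat
decreasing_by omega

-- Python's negative-index wraparound (exact for -len ≤ i; below -len Python raises)
def pyAdjIdx (len : Int) (i : Int) : Int := if i < 0 then i + len else i

-- literal port of A; list indexing is via .getD/.set at indices that are in range on
-- every input Pre_ admits (Python raises only outside Pre_)
def enlarge_gcd (nums : List Int) : Int :=
  let n : Int := nums.length
  let current_gcd :=
    (PySem.List.pyRange 1 n 1).foldl
      (fun g i => (Int.gcd g (PySem.List.pyGetD nums i 0) : Int))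
      (PySem.List.pyGetD nums 0 0)
  let normalized := nums.map (fun num => PySem.Int.floordiv num current_gcd)
  let max_value := (PySem.List.max? normalized (fun x => x)).getD 0
  let is_prime0 := ((List.replicate (max_value + 1).toNat true).set 0 false).set 1 false
  let is_prime := egSieveOuter max_value 2 is_prime0
  let count := normalized.foldl
      (fun c num => c.set (pyAdjIdx c.length num).toNat
        (c.getD (pyAdjIdx c.length num).toNat 0 + 1))
      (List.replicate (max_value + 1).toNat (0 : Int))
  let max_count := (PySem.List.pyRange 2 (max_value + 1) 1).foldl
      (fun mc i => if is_prime.getD i.toNat false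
                   then max mc (egPrimeCount max_value i i count 0) else mc) 0
  if max_count = n then -1 else n - max_count

-- ===== PORT B =====
def enlarge_gcd_alt (nums : List Int) : Int :=
  let n : Int := nums.length
  let g := nums.foldl (fun g x => (Int.gcd g x : Int)) 0
  let normalized := nums.map (fun x => PySem.Int.floordiv x g)
  let m := (PySem.List.max? normalized (fun x => x)).getD 0
  let freq := normalized.foldl (fun d x => d.insert x (d.getD x 0 + 1))
      (PySem.Dict.empty : PySem.Dict Int Int)
  let best := (PySem.List.pyRange 2 (m + 1) 1).foldl
      (fun best d =>
        let c := (PySem.List.pyRange d (m + 1) d).foldl (fun c j => c + freq.getD j 0) 0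
        if c > best then c else best) 0
  if best = n then -1 else n - best

-- ===== PRECONDITION & SPEC =====
-- Pre_ restricts to the problem's natural domain (CF1034A: a nonempty list of
-- non-negative integers, not all zero); outside it A raises (IndexError on [] and on
-- lists whose normalized maximum is < 1, ZeroDivisionError on all-zero lists) or, on
-- lists with negative entries, returns accidental values produced by negative-index
-- wraparound in its count array.
def Pre_enlarge_gcd (nums : List Int) : Prop :=
  nums ≠ [] ∧ (∀ x ∈ nums, 0 ≤ x) ∧ ∃ x ∈ nums, 1 ≤ x
instance (nums : List Int) : Decidable (Pre_enlarge_gcd nums) := by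
  unfold Pre_enlarge_gcd; infer_instance

def pvWitness_enlarge_gcd : List Int := [6, 9, 15, 30]

def Spec_enlarge_gcd (nums : List Int) (out : Int) : Prop := out = enlarge_gcd_alt nums
instance (nums : List Int) (out : Int) : Decidable (Spec_enlarge_gcd nums out) := by
  unfold Spec_enlarge_gcd; infer_instance

-- ===== CLAIM (what is proved, stated in full; the proofs are below) =====
def Claim_equal_enlarge_gcd : Prop := ∀ (nums : List Int), Dom_enlarge_gcd nums →
  Pre_enlarge_gcd nums → Spec_enlarge_gcd nums (enlarge_gcd nums)

-- ===== LEMMAS AND PROOFS =====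

-- the common gcd fold
def gfold (a : Int) (t : List Int) : Int := t.foldl (fun g x => (Int.gcd g x : Int)) a

-- how many elements of N the candidate d divides
def cntd (N : List Int) (d : Int) : Int := (N.countP (fun x => decide (d ∣ x ∧ 1 ≤ x)) : Int)

-- running maximum of f over the elements of l that satisfy P
def foldMaxP (P : Int → Bool) (f : Int → Int) (acc : Int) (l : List Int) : Int :=
  l.foldl (fun a i => if P i then max a (f i) else a) acc

lemma gfold_nonneg {a : Int} (ha : 0 ≤ a) (t : List Int) : 0 ≤ gfold a t := by
  induction t generalizing a with
  | nil => exact ha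
  | cons x t ih =>
    show 0 ≤ gfold ((Int.gcd a x : Nat) : Int) t
    exact ih (Int.natCast_nonneg _)

lemma gfold_dvd (a : Int) (t : List Int) : gfold a t ∣ a ∧ ∀ x ∈ t, gfold a t ∣ x := by
  induction t generalizing a with
  | nil => exact ⟨dvd_refl a, by simp⟩
  | cons x t ih =>
    obtain ⟨h1, h2⟩ := ih ((Int.gcd a x : Int))
    refine ⟨h1.trans (Int.gcd_dvd_left a x), ?_⟩
    intro y hy
    rcases List.mem_cons.mp hy with rfl | hy
    · exact h1.trans (Int.gcd_dvd_right a y)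
    · exact h2 y hy

lemma pyRange_pos_nil {a b s : Int} (hs : 0 < s) (hba : b ≤ a) :
    PySem.List.pyRange a b s = [] := by
  rw [PySem.List.pyRange_of_pos _ _ hs, if_neg (not_lt.mpr hba)]
  simp

lemma pyRange_pos_cons {a b s : Int} (hs : 0 < s) (hab : a < b) :
    PySem.List.pyRange a b s = a :: PySem.List.pyRange (a + s) b s := by
  rw [PySem.List.pyRange_of_pos _ _ hs, PySem.List.pyRange_of_pos _ _ hs,
    if_pos hab]
  have hq : (b - a + s - 1) / s = (b - a - 1) / s + 1 := by
    have : b - a + s - 1 = (b - a - 1) + 1 * s := by ring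
    rw [this, Int.add_mul_ediv_right _ _ (ne_of_gt hs)]
  have hK' : (if a + s < b then ((b - (a + s) + s - 1) / s).toNat else 0)
      = ((b - a - 1) / s).toNat := by
    split_ifs with h
    · congr 1; ring_nf
    · have : (b - a - 1) / s = 0 := Int.ediv_eq_zero_of_lt (by omega) (by omega)
      omega
  have hq0 : 0 ≤ (b - a - 1) / s := Int.ediv_nonneg (by omega) (by omega)
  rw [hq, hK']
  have : ((b - a - 1) / s + 1).toNat = ((b - a - 1) / s).toNat + 1 := by omega
  rw [this, List.range_succ_eq_map]
  simp only [List.map_cons, List.map_map]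
  refine List.cons_eq_cons.mpr ⟨by simp, ?_⟩
  apply List.map_congr_left
  intro k _
  simp only [Function.comp_apply, Nat.succ_eq_add_one]
  push_cast
  ring

lemma nodup_pyRange_pos {a b s : Int} (hs : 0 < s) : (PySem.List.pyRange a b s).Nodup := by
  rw [PySem.List.pyRange_of_pos _ _ hs]
  refine List.Nodup.map ?_ (List.nodup_range)
  intro k1 k2 h
  have h2 : s * (k1 : Int) = s * (k2 : Int) := by
    simpa using h
  have := mul_left_cancel₀ (ne_of_gt hs) h2
  exact_mod_cast this

lemma hist (l : List Int) : ∀ (c : List Int), (∀ x ∈ l, 0 ≤ x ∧ x.toNat < c.length) →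
    ∀ j : Nat,
      (l.foldl (fun c num => c.set (pyAdjIdx c.length num).toNat
          (c.getD (pyAdjIdx c.length num).toNat 0 + 1)) c).getD j 0
        = c.getD j 0 + (l.count (j : Int) : Int) := by
  induction l with
  | nil => intro c _ j; simp
  | cons x l ih =>
    intro c hb j
    obtain ⟨hx0, hxlt⟩ := hb x List.mem_cons_self
    have hadj : pyAdjIdx (c.length : Int) x = x := by
      unfold pyAdjIdx
      rw [if_neg (by omega)]
    rw [List.foldl_cons, hadj]
    have hb' : ∀ y ∈ l, 0 ≤ y ∧ y.toNat < (c.set x.toNat (c.getD x.toNat 0 + 1)).length := by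
      intro y hy; simpa using hb y (List.mem_cons_of_mem _ hy)
    rw [ih _ hb' j, List.count_cons]
    by_cases hxe : x.toNat = j
    · have hset : (c.set x.toNat (c.getD x.toNat 0 + 1)).getD j 0 = c.getD j 0 + 1 := by
        subst hxe
        simp [List.getD_eq_getElem?_getD, hxlt]
      rw [hset]
      have hxj : x = (j : Int) := by omega
      simp only [hxj, beq_self_eq_true, if_true]
      push_cast
      ring
    · have hxj : x ≠ (j : Int) := by omega
      have hset : (c.set x.toNat (c.getD x.toNat 0 + 1)).getD j 0 = c.getD j 0 := by
        simp [List.getD_eq_getElem?_getD, hxe]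
      rw [hset]
      simp only [beq_iff_eq, hxj, if_false]
      push_cast
      ring

lemma sum_ite_mem (x : Int) : ∀ (R : List Int), R.Nodup →
    (R.map (fun j => if x = j then (1 : Int) else 0)).sum = if x ∈ R then (1 : Int) else 0 := by
  intro R
  induction R with
  | nil => simp
  | cons j R ih =>
    intro hnd
    obtain ⟨hj, hnd'⟩ := List.nodup_cons.mp hnd
    rw [List.map_cons, List.sum_cons, ih hnd']
    by_cases hxj : x = j
    · subst hxj
      simp [hj]
    · simp [hxj]

lemma sum_count (l : List Int) : ∀ (R : List Int), R.Nodup →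
    (R.map (fun j => (l.count j : Int))).sum
      = (l.countP (fun x => decide (x ∈ R)) : Int) := by
  induction l with
  | nil => intro R _; simp
  | cons x l ih =>
    intro R hnd
    have hmap : R.map (fun j => ((x :: l).count j : Int))
        = R.map (fun j => ((l.count j : Int) + if x = j then (1 : Int) else 0)) := by
      apply List.map_congr_left
      intro j _
      rw [List.count_cons]
      by_cases hxj : x = j
      · simp [hxj]
      · simp [hxj]
    rw [hmap, PySem.List.sum_map_add_int, ih R hnd, sum_ite_mem x R hnd,
      List.countP_cons]
    by_cases hx : x ∈ R
    · simp [hx]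
    · simp [hx]

lemma primeCount_eq (maxV i : Int) (cnt : List Int) (hi : 0 < i) : ∀ (j acc : Int),
    egPrimeCount maxV i j cnt acc
      = acc + ((PySem.List.pyRange j (maxV + 1) i).map (fun x => cnt.getD x.toNat 0)).sum := by
  intro j acc
  fun_induction egPrimeCount maxV i j cnt acc with
  | case1 j acc h ih =>
    rw [pyRange_pos_cons hi (by omega : j < maxV + 1), List.map_cons, List.sum_cons, ih]
    ring
  | case2 j acc h =>
    rw [pyRange_pos_nil hi (by omega : maxV + 1 ≤ j)]
    simp

lemma foldMaxP_init_le (P : Int → Bool) (f : Int → Int) :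
    ∀ (l : List Int) (acc : Int), acc ≤ foldMaxP P f acc l := by
  intro l
  induction l with
  | nil => intro acc; exact le_refl acc
  | cons x l ih =>
    intro acc
    show acc ≤ foldMaxP P f (if P x then max acc (f x) else acc) l
    refine le_trans ?_ (ih _)
    split_ifs
    · exact le_max_left _ _
    · exact le_refl acc

lemma foldMaxP_le (P : Int → Bool) (f : Int → Int) {c : Int} :
    ∀ (l : List Int) (acc : Int), (∀ i ∈ l, P i → f i ≤ c) → acc ≤ c →
      foldMaxP P f acc l ≤ c := by
  intro l
  induction l with
  | nil => intro acc _ hc; exact hc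
  | cons x l ih =>
    intro acc h hc
    show foldMaxP P f (if P x then max acc (f x) else acc) l ≤ c
    refine ih _ (fun i hi hp => h i (List.mem_cons_of_mem _ hi) hp) ?_
    split_ifs with hP
    · exact max_le hc (h x List.mem_cons_self hP)
    · exact hc

lemma le_foldMaxP (P : Int → Bool) (f : Int → Int) :
    ∀ (l : List Int) (acc : Int) (i : Int), i ∈ l → P i → f i ≤ foldMaxP P f acc l := by
  intro l
  induction l with
  | nil => intro acc i hi; exact absurd hi (List.not_mem_nil)
  | cons x l ih =>
    intro acc i hi hP
    rcases List.mem_cons.mp hi with rfl | hi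
    · show f i ≤ foldMaxP P f (if P i then max acc (f i) else acc) l
      rw [if_pos hP]
      exact le_trans (le_max_right _ _) (foldMaxP_init_le P f l _)
    · exact ih _ i hi hP

lemma sieveInner_preserve {p : Nat} (hp : Nat.Prime p) (maxV i : Int) (h2 : 2 ≤ i) :
    ∀ (j : Int) (arr : List Bool), i ∣ j → 2 * i ≤ j →
      (egSieveInner maxV i j arr).getD p false = arr.getD p false := by
  apply egSieveInner.induct maxV i (motive := fun j arr => i ∣ j → 2 * i ≤ j →
    (egSieveInner maxV i j arr).getD p false = arr.getD p false)
  · intro j arr h ih hdvd hle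
    obtain ⟨q, rfl⟩ := hdvd
    have hq2 : 2 ≤ q := by
      by_contra hq
      have h1 : i * q ≤ i * 1 := mul_le_mul_of_nonneg_left (by omega) (by omega)
      omega
    have hne : (i * q).toNat ≠ p := by
      intro hEq
      have hji : i * q = (p : Int) := by omega
      have hpp : Prime ((p : Nat) : Int) := by
        rw [Int.prime_iff_natAbs_prime]
        simpa using hp
      rcases hpp.irreducible.isUnit_or_isUnit hji.symm with hu | hu <;>
        · rw [Int.isUnit_iff] at hu
          omega
    rw [egSieveInner, dif_pos h, ih ⟨q + 1, by ring⟩ (by omega)]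
    simp [List.getD_eq_getElem?_getD, hne]
  · intro j arr h _ _
    rw [egSieveInner, dif_neg h]

lemma sieveOuter_preserve {p : Nat} (hp : Nat.Prime p) (maxV : Int) :
    ∀ (i : Int) (arr : List Bool), 2 ≤ i →
      (egSieveOuter maxV i arr).getD p false = arr.getD p false := by
  apply egSieveOuter.induct maxV (motive := fun i arr => 2 ≤ i →
    (egSieveOuter maxV i arr).getD p false = arr.getD p false)
  · intro i arr h ih h2
    simp only [dite_eq_ite] at ih
    rw [egSieveOuter, dif_pos h, ih (by omega)]
    split_ifs with harr
    · exact sieveInner_preserve hp maxV i h2 (i * i) arr ⟨i, by ring⟩ (by nlinarith)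
    · rfl
  · intro i arr h _
    rw [egSieveOuter, dif_neg h]

lemma ite_gt_eq_max (a c : Int) : (if c > a then c else a) = max a c := by
  simp only [max_def]
  split_ifs <;> omega

lemma equal_core (nums : List Int) (hpre : Pre_enlarge_gcd nums) :
    enlarge_gcd nums = enlarge_gcd_alt nums := by
  obtain ⟨hne, hpos0, xp, hxp, hxp1⟩ := hpre
  obtain ⟨x₀, t, rfl⟩ : ∃ x₀ t, nums = x₀ :: t := by
    cases nums with
    | nil => exact absurd rfl hne
    | cons a l => exact ⟨a, l, rfl⟩
  have hx₀ : 0 ≤ x₀ := hpos0 _ List.mem_cons_self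
  have hgnn : 0 ≤ gfold x₀ t := gfold_nonneg hx₀ t
  have hgd : ∀ x ∈ x₀ :: t, gfold x₀ t ∣ x := by
    intro x hx
    rcases List.mem_cons.mp hx with rfl | hx
    · exact (gfold_dvd x t).1
    · exact (gfold_dvd x₀ t).2 x hx
  have hg0 : 0 < gfold x₀ t := by
    by_contra h
    have hg_eq : gfold x₀ t = 0 := by omega
    have hdx := hgd xp hxp
    rw [hg_eq] at hdx
    have := zero_dvd_iff.mp hdx
    omega
  have hgA : (PySem.List.pyRange 1 (((x₀ :: t).length : Int)) 1).foldl
      (fun g i => (Int.gcd g (PySem.List.pyGetD (x₀ :: t) i 0) : Int))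
      (PySem.List.pyGetD (x₀ :: t) 0 0) = gfold x₀ t := by
    rw [PySem.List.foldl_pyRange_pyGetD' (x₀ :: t) 0 (fun g x => (Int.gcd g x : Int))
      (PySem.List.pyGetD (x₀ :: t) 0 0) (by norm_num : (0:Int) ≤ 1)]
    norm_num [gfold]
  have hgB : (x₀ :: t).foldl (fun g x => (Int.gcd g x : Int)) 0 = gfold x₀ t := by
    rw [List.foldl_cons]
    have h0 : (Int.gcd 0 x₀ : Int) = x₀ := by
      rw [Int.gcd_zero_left]
      omega
    rw [h0]
    rfl
  simp only [enlarge_gcd, enlarge_gcd_alt]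
  rw [hgA, hgB]
  set N := (x₀ :: t).map (fun x => PySem.Int.floordiv x (gfold x₀ t)) with hN
  have hNne : N ≠ [] := by simp [hN]
  obtain ⟨m, hm⟩ : ∃ m, PySem.List.max? N (fun x => x) = some m := by
    cases hmx : PySem.List.max? N (fun x => x) with
    | none => exact absurd ((PySem.List.max?_eq_none_iff N (fun x => x)).mp hmx) hNne
    | some m => exact ⟨m, rfl⟩
  have hmmax : ∀ y ∈ N, y ≤ m := PySem.List.max?_isMax hm
  have hmN : m ∈ N := PySem.List.max?_mem hm
  have hNlow : ∀ y ∈ N, 0 ≤ y := by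
    intro y hy
    obtain ⟨x, hx, rfl⟩ := List.mem_map.mp hy
    rw [PySem.Int.floordiv_eq_ediv_of_pos hg0]
    exact Int.ediv_nonneg (hpos0 x hx) (le_of_lt hg0)
  have hm1 : 1 ≤ m := by
    have hyp : 1 ≤ PySem.Int.floordiv xp (gfold x₀ t) := by
      rw [PySem.Int.floordiv_eq_ediv_of_pos hg0, Int.le_ediv_iff_mul_le hg0, one_mul]
      exact Int.le_of_dvd (by omega) (hgd xp hxp)
    have := hmmax _ (List.mem_map.mpr ⟨xp, hxp, rfl⟩)
    omega
  rw [hm]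
  simp only [Option.getD_some]
  -- the count array reads back the multiplicities of N
  have hcnt_arr : ∀ jj : Int, 0 ≤ jj →
      (N.foldl (fun c num => c.set (pyAdjIdx c.length num).toNat
          (c.getD (pyAdjIdx c.length num).toNat 0 + 1))
        (List.replicate ((m + 1).toNat) (0 : Int))).getD jj.toNat 0 = (N.count jj : Int) := by
    intro jj h0
    rw [hist N _ (by
      intro x hx
      have h1 := hNlow x hx
      have h2 := hmmax x hx
      constructor
      · omega
      · rw [List.length_replicate]
        omega) jj.toNat]
    rw [Int.toNat_of_nonneg h0]
    simp only [List.getD_eq_getElem?_getD, List.getElem?_replicate]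
    split <;> simp
  -- the multiple-count of a candidate dd, both as A and as B compute it
  have hcountR : ∀ dd : Int, 2 ≤ dd →
      ((PySem.List.pyRange dd (m + 1) dd).map (fun j => (N.count j : Int))).sum = cntd N dd := by
    intro dd hdd
    rw [sum_count N _ (nodup_pyRange_pos (by omega))]
    unfold cntd
    congr 1
    apply List.countP_congr
    intro x hx
    have h1 := hNlow x hx
    have h2 := hmmax x hx
    simp only [decide_eq_true_eq]
    rw [PySem.List.mem_pyRange_iff_of_pos (by omega)]
    constructor
    · rintro ⟨h3, -, h4⟩
      refine ⟨?_, by omega⟩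
      have := dvd_add h4 (dvd_refl dd)
      simpa using this
    · rintro ⟨h3, h4⟩
      exact ⟨Int.le_of_dvd (by omega) h3, by omega, dvd_sub h3 (dvd_refl dd)⟩
  have hinnerA : ∀ i : Int, 2 ≤ i → i < m + 1 →
      egPrimeCount m i i (N.foldl (fun c num => c.set (pyAdjIdx c.length num).toNat
          (c.getD (pyAdjIdx c.length num).toNat 0 + 1))
        (List.replicate ((m + 1).toNat) (0 : Int))) 0 = cntd N i := by
    intro i h1 h2
    rw [primeCount_eq m i _ (by omega) i 0, zero_add]
    rw [List.map_congr_left (fun j hj => by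
      obtain ⟨hj1, hj2, hj3⟩ := (PySem.List.mem_pyRange_iff_of_pos (by omega : (0:Int) < i) j).mp hj
      exact hcnt_arr j (by omega))]
    exact hcountR i h1
  have hinnerB : ∀ d : Int, 2 ≤ d →
      (PySem.List.pyRange d (m + 1) d).foldl
        (fun c j => c + (N.foldl (fun d x => d.insert x (d.getD x 0 + 1))
          (PySem.Dict.empty : PySem.Dict Int Int)).getD j 0) 0 = cntd N d := by
    intro d h1
    rw [PySem.Dict.foldl_insert_getD_add_one_eq_counter N, PySem.List.foldl_add, zero_add]
    rw [List.map_congr_left (fun j _ => PySem.Dict.getD_counter N j)]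
    exact hcountR d h1
  -- both outer loops as foldMaxP over the same candidate range
  set SIEVE := egSieveOuter m 2 (((List.replicate ((m + 1).toNat) true).set 0 false).set 1 false) with hsv
  have hmemR : ∀ i : Int, i ∈ PySem.List.pyRange 2 (m + 1) 1 ↔ 2 ≤ i ∧ i < m + 1 :=
    fun i => PySem.List.mem_pyRange_one
  have hA : List.foldl (fun mc i => if SIEVE.getD i.toNat false
        then max mc (egPrimeCount m i i (N.foldl (fun c num => c.set (pyAdjIdx c.length num).toNat
          (c.getD (pyAdjIdx c.length num).toNat 0 + 1))
          (List.replicate ((m + 1).toNat) (0 : Int))) 0) else mc) 0 (PySem.List.pyRange 2 (m + 1) 1)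
      = foldMaxP (fun i => SIEVE.getD i.toNat false) (cntd N) 0 (PySem.List.pyRange 2 (m + 1) 1) := by
    unfold foldMaxP
    apply PySem.List.foldl_congr_mem
    intro acc i hi
    obtain ⟨h1, h2⟩ := (hmemR i).mp hi
    rw [hinnerA i h1 h2]
  have hB : List.foldl (fun best d =>
        if (PySem.List.pyRange d (m + 1) d).foldl
            (fun c j => c + (N.foldl (fun d x => d.insert x (d.getD x 0 + 1))
              (PySem.Dict.empty : PySem.Dict Int Int)).getD j 0) 0 > best
        then (PySem.List.pyRange d (m + 1) d).foldl
            (fun c j => c + (N.foldl (fun d x => d.insert x (d.getD x 0 + 1))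
              (PySem.Dict.empty : PySem.Dict Int Int)).getD j 0) 0
        else best) 0 (PySem.List.pyRange 2 (m + 1) 1)
      = foldMaxP (fun _ => true) (cntd N) 0 (PySem.List.pyRange 2 (m + 1) 1) := by
    unfold foldMaxP
    apply PySem.List.foldl_congr_mem
    intro acc d hd
    obtain ⟨h1, h2⟩ := (hmemR d).mp hd
    rw [hinnerB d h1, ite_gt_eq_max]
    simp
  have hmarked_prime : ∀ pn : Nat, Nat.Prime pn → (pn : Int) ≤ m →
      SIEVE.getD ((pn : Int)).toNat false = true := by
    intro pn hpp hpm
    have h2 := hpp.two_le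
    have hlt : pn < (m + 1).toNat := by omega
    rw [Int.toNat_natCast, hsv, sieveOuter_preserve hpp m 2 _ (by omega),
      List.getD_eq_getElem?_getD, List.getElem?_set, if_neg (by omega : ¬ (1 = pn)),
      List.getElem?_set, if_neg (by omega : ¬ (0 = pn)),
      List.getElem?_replicate, if_pos hlt]
    rfl
  have hBleA : foldMaxP (fun _ => true) (cntd N) 0 (PySem.List.pyRange 2 (m + 1) 1)
      ≤ foldMaxP (fun i => SIEVE.getD i.toNat false) (cntd N) 0 (PySem.List.pyRange 2 (m + 1) 1) := by
    refine foldMaxP_le _ _ _ _ ?_ (foldMaxP_init_le _ _ _ _)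
    intro d hd _
    obtain ⟨h1, h2⟩ := (hmemR d).mp hd
    have hpp : Nat.Prime d.toNat.minFac := Nat.minFac_prime (by omega)
    have hpdn : (d.toNat.minFac : Int) ∣ d := by
      have h := Int.natCast_dvd_natCast.mpr (Nat.minFac_dvd d.toNat)
      simpa [Int.toNat_of_nonneg (by omega : (0 : Int) ≤ d)] using h
    have hple : (d.toNat.minFac : Int) ≤ d := by
      have := Nat.minFac_le (show 0 < d.toNat by omega)
      omega
    have hp2 : 2 ≤ (d.toNat.minFac : Int) := by exact_mod_cast hpp.two_le
    have hcle : cntd N d ≤ cntd N (d.toNat.minFac : Int) := by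
      unfold cntd
      have h := List.countP_mono_left (l := N) (p := fun x => decide (d ∣ x ∧ 1 ≤ x))
        (q := fun x => decide ((d.toNat.minFac : Int) ∣ x ∧ 1 ≤ x)) (by
          intro x _ hdx
          simp only [decide_eq_true_eq] at *
          exact ⟨dvd_trans hpdn hdx.1, hdx.2⟩)
      exact_mod_cast h
    refine le_trans hcle (le_foldMaxP _ _ _ _ _ ((hmemR _).mpr ⟨hp2, by omega⟩) ?_)
    exact hmarked_prime d.toNat.minFac hpp (by omega)
  have hAleB : foldMaxP (fun i => SIEVE.getD i.toNat false) (cntd N) 0 (PySem.List.pyRange 2 (m + 1) 1)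
      ≤ foldMaxP (fun _ => true) (cntd N) 0 (PySem.List.pyRange 2 (m + 1) 1) := by
    refine foldMaxP_le _ _ _ _ ?_ (foldMaxP_init_le _ _ _ _)
    intro i hi _
    exact le_foldMaxP _ _ _ _ _ hi rfl
  have hKeq := le_antisymm hAleB hBleA
  rw [hA, hB, hKeq]

-- ===== VERDICT (by name: the statement is the Claim_ definition above) =====
theorem enlarge_gcd_spec : Claim_equal_enlarge_gcd := by
  intro nums _ hpre
  exact equal_core nums hpre
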